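-- pv_equiv track=rewrite | github.com/azizcs462/Data-Structures-and-Algorithms | ProblemsAndSolutions/findDistinceElementMatrix.py | distinctElement
-- ===== SOURCE A (Python) =====
-- def distinctElement(Matrix):
--     result = 0
--     numberDict = {}
--     rows = len(Matrix)
--
--     for i in range(rows):
--         numberSet = set(Matrix[i])
--
--         for num in numberSet:
--             if num in numberDict:
--                 numberDict[num] = numberDict[num]+1
--             else:
--                 numberDict[num] = 1
--
--     for item in numberDict:
--         if numberDict[item] ==rows:
--             result = result+1
--
--     return result
--
--
--
--
--     return Matrix
-- ===== SOURCE B (Python) =====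
-- def distinctElement(Matrix):
--     if not Matrix:
--         return 0
--     common = set(Matrix[0])
--     for row in Matrix[1:]:
--         common &= set(row)
--     return len(common)
-- ===== Notes on version B (the rewrite author's own statement) =====
-- stated objective: idiomatic
-- what changed: Replaces the per-element count dictionary plus a final equality-to-row-count scan with a running set intersection across the rows, returning the size of the final common set.
import Mathlib
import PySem

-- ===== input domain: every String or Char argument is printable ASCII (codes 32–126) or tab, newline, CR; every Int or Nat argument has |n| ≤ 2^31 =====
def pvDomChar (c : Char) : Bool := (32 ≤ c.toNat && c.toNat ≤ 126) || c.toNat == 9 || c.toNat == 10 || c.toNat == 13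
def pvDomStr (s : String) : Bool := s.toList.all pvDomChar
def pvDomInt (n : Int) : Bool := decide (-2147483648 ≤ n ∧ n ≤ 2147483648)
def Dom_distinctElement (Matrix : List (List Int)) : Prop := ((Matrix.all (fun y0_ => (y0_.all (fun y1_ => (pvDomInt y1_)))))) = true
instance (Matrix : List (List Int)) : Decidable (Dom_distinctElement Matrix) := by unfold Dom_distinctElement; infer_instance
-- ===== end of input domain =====

-- B maintains a running intersection of per-row sets instead of A's per-element
-- occurrence-count dictionary; same result, idiomatic set formulation.

-- ===== PORT A =====
def distinctElement (Matrix : List (List Int)) : Int :=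
  let result : Int := 0
  let rows : Int := Matrix.length
  let numberDict : PySem.Dict Int Int :=
    (PySem.List.pyRange 0 rows 1).foldl (fun d i =>
      let numberSet : PySem.Set Int := PySem.Set.ofList (PySem.List.pyGetD Matrix i [])
      numberSet.foldl (fun d num =>
        if d.contains num then d.insert num (d.getD num 0 + 1) else d.insert num 1) d)
      PySem.Dict.empty
  numberDict.keys.foldl (fun result item =>
    if numberDict.getD item 0 = rows then result + 1 else result) result

-- ===== PORT B =====
def distinctElement_alt (Matrix : List (List Int)) : Int :=
  match Matrix with
  | [] => 0
  | r0 :: rest =>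
    let common : PySem.Set Int :=
      rest.foldl (fun s row => PySem.Set.inter s (PySem.Set.ofList row)) (PySem.Set.ofList r0)
    (common.length : Int)

-- ===== PRECONDITION & SPEC =====
def Spec_distinctElement (Matrix : List (List Int)) (out : Int) : Prop := out = distinctElement_alt Matrix
instance (Matrix : List (List Int)) (out : Int) : Decidable (Spec_distinctElement Matrix out) := by unfold Spec_distinctElement; infer_instance

-- ===== CLAIM (what is proved, stated in full; the proofs are below) =====
def Claim_equal_distinctElement : Prop := ∀ (Matrix : List (List Int)), Dom_distinctElement Matrix → Spec_distinctElement Matrix (distinctElement Matrix)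

-- ===== LEMMAS AND PROOFS =====

-- A's dict-building step, with the if/else collapsed (when absent, the count defaults to 0)
def pvStep (d : PySem.Dict Int Int) (row : List Int) : PySem.Dict Int Int :=
  (PySem.Set.ofList row).foldl (fun d x => d.insert x (d.getD x 0 + 1)) d

theorem pv_branch (d : PySem.Dict Int Int) (num : Int) :
    (if d.contains num then d.insert num (d.getD num 0 + 1) else d.insert num 1)
      = d.insert num (d.getD num 0 + 1) := by
  by_cases h : d.contains num = true
  · simp [h]
  · have hb : d.contains num = false := by simpa using h
    have h2 : d.get? num = none := by
      have := PySem.Dict.contains_eq_isSome_get? (d := d) (k := num)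
      rw [hb] at this
      exact Option.not_isSome_iff_eq_none.mp (by simp [← this])
    simp [h, PySem.Dict.getD, h2]

theorem pv_dict_eq (Matrix : List (List Int)) :
    (PySem.List.pyRange 0 (Matrix.length : Int) 1).foldl (fun d i =>
        (PySem.Set.ofList (PySem.List.pyGetD Matrix i [])).foldl (fun d num =>
          if d.contains num then d.insert num (d.getD num 0 + 1) else d.insert num 1) d)
      PySem.Dict.empty
    = Matrix.foldl pvStep PySem.Dict.empty := by
  have hf : (fun (d : PySem.Dict Int Int) (num : Int) =>
      if d.contains num then d.insert num (d.getD num 0 + 1) else d.insert num 1)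
      = (fun (d : PySem.Dict Int Int) (x : Int) => d.insert x (d.getD x 0 + 1)) := by
    funext d num; exact pv_branch d num
  rw [hf]
  unfold pvStep
  exact PySem.List.foldl_pyRange_zero_pyGetD' Matrix []
    (fun d row => (PySem.Set.ofList row).foldl
      (fun (d : PySem.Dict Int Int) (x : Int) => d.insert x (d.getD x 0 + 1)) d)
    PySem.Dict.empty

theorem pv_ofList_count (row : List Int) (v : Int) :
    ((PySem.Set.ofList row).count v : Int) = if v ∈ row then 1 else 0 := by
  by_cases hm : v ∈ row
  · have h1 : (PySem.Set.ofList row).count v = 1 :=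
      List.count_eq_one_of_mem (PySem.Set.nodup_ofList _) ((PySem.Set.mem_ofList _ _).mpr hm)
    rw [h1]
    simp [hm]
  · have h0 : (PySem.Set.ofList row).count v = 0 :=
      List.count_eq_zero.mpr (fun hc => hm ((PySem.Set.mem_ofList _ _).mp hc))
    simp [h0, hm]

theorem pv_getD_foldl (Matrix : List (List Int)) (d : PySem.Dict Int Int) (v : Int) :
    (Matrix.foldl pvStep d).getD v 0
      = d.getD v 0 + (Matrix.countP (fun row => decide (v ∈ row)) : Int) := by
  induction Matrix generalizing d with
  | nil => simp
  | cons row rest ih =>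
    simp only [List.foldl_cons]
    rw [ih]
    have h1 : (pvStep d row).getD v 0 = d.getD v 0 + ((PySem.Set.ofList row).count v : Int) := by
      unfold pvStep
      exact PySem.Dict.getD_foldl_insert_add_one _ _ _
    rw [h1, pv_ofList_count]
    by_cases hm : v ∈ row
    · simp [hm]
      ring
    · simp [hm]

theorem pv_mem_keys_foldl (Matrix : List (List Int)) (d : PySem.Dict Int Int) (x : Int) :
    x ∈ (Matrix.foldl pvStep d).keys ↔ x ∈ d.keys ∨ ∃ row ∈ Matrix, x ∈ row := by
  induction Matrix generalizing d with
  | nil => simp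
  | cons row rest ih =>
    simp only [List.foldl_cons]
    rw [ih]
    unfold pvStep
    rw [PySem.Dict.keys_foldl_insert]
    simp [PySem.Set.mem_update, PySem.Set.mem_ofList]
    tauto

theorem pv_nodup_keys_foldl (Matrix : List (List Int)) (d : PySem.Dict Int Int)
    (h : d.keys.Nodup) : (Matrix.foldl pvStep d).keys.Nodup := by
  induction Matrix generalizing d with
  | nil => simpa using h
  | cons row rest ih =>
    exact ih _ (PySem.Dict.nodup_keys_foldl_insert _ _ _ h)

theorem pv_mem_inter_foldl (rest : List (List Int)) (s : PySem.Set Int) (x : Int) :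
    x ∈ rest.foldl (fun s row => PySem.Set.inter s (PySem.Set.ofList row)) s
      ↔ x ∈ s ∧ ∀ row ∈ rest, x ∈ row := by
  induction rest generalizing s with
  | nil => simp
  | cons row rest ih =>
    simp [ih, PySem.Set.mem_inter, PySem.Set.mem_ofList]
    tauto

theorem pv_nodup_inter_foldl (rest : List (List Int)) (s : PySem.Set Int) (h : s.Nodup) :
    (rest.foldl (fun s row => PySem.Set.inter s (PySem.Set.ofList row)) s).Nodup := by
  induction rest generalizing s with
  | nil => simpa using h
  | cons row rest ih =>
    simp only [List.foldl_cons]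
    exact ih _ (PySem.Set.nodup_inter _ _ h)

theorem pv_A_eq (Matrix : List (List Int)) :
    distinctElement Matrix =
      (((Matrix.foldl pvStep PySem.Dict.empty).keys.filter
        (fun k => decide ((Matrix.foldl pvStep PySem.Dict.empty).getD k 0 = (Matrix.length : Int)))).length : Int) := by
  simp only [distinctElement, pv_dict_eq]
  rw [PySem.List.foldl_ite_add_one]
  simp [List.countP_eq_length_filter]

theorem pv_all_iff (Matrix : List (List Int)) (x : Int) :
    ((Matrix.countP (fun row => decide (x ∈ row)) : Int) = (Matrix.length : Int))
      ↔ ∀ r ∈ Matrix, x ∈ r := by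
  rw [Nat.cast_inj, List.countP_eq_length]
  simp

-- ===== VERDICT (by name: the statement is the Claim_ definition above) =====
theorem distinctElement_spec : Claim_equal_distinctElement := by
  intro Matrix _
  unfold Spec_distinctElement
  rw [pv_A_eq]
  cases Matrix with
  | nil => simp [distinctElement_alt]
  | cons r0 rest =>
    show _ = ((rest.foldl (fun s row => PySem.Set.inter s (PySem.Set.ofList row))
        (PySem.Set.ofList r0)).length : Int)
    have hmem : ∀ x : Int,
        (x ∈ ((r0 :: rest).foldl pvStep PySem.Dict.empty).keys.filter
            (fun k => decide (((r0 :: rest).foldl pvStep PySem.Dict.empty).getD k 0 = ((r0 :: rest).length : Int))))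
          ↔ x ∈ rest.foldl (fun s row => PySem.Set.inter s (PySem.Set.ofList row)) (PySem.Set.ofList r0) := by
      intro x
      rw [List.mem_filter, pv_mem_inter_foldl, pv_mem_keys_foldl]
      simp only [PySem.Dict.keys_empty, List.not_mem_nil, false_or, decide_eq_true_eq,
        pv_getD_foldl, PySem.Dict.getD_empty, zero_add, PySem.Set.mem_ofList, pv_all_iff]
      constructor
      · rintro ⟨-, hall⟩
        exact ⟨hall r0 (by simp), fun r hr => hall r (by simp [hr])⟩
      · rintro ⟨h0, hrest⟩
        have hall : ∀ r ∈ (r0 :: rest), x ∈ r := by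
          intro r hr
          rcases List.mem_cons.mp hr with h | h
          · subst h; exact h0
          · exact hrest r h
        exact ⟨⟨r0, by simp, h0⟩, hall⟩
    have hndA : (((r0 :: rest).foldl pvStep PySem.Dict.empty).keys.filter
        (fun k => decide (((r0 :: rest).foldl pvStep PySem.Dict.empty).getD k 0 = ((r0 :: rest).length : Int)))).Nodup :=
      (pv_nodup_keys_foldl _ _ (by simp)).filter _
    have hndB : (rest.foldl (fun s row => PySem.Set.inter s (PySem.Set.ofList row))
        (PySem.Set.ofList r0)).Nodup :=
      pv_nodup_inter_foldl _ _ (PySem.Set.nodup_ofList _)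
    have hperm := (List.perm_ext_iff_of_nodup hndA hndB).mpr hmem
    exact_mod_cast congrArg Nat.cast hperm.length_eq
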